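-- pv_equiv track=rewrite | github.com/aszokalski/Logia | Etap 3/Logia11/Zad2.py | kostka
-- ===== SOURCE A (Python) =====
-- def kostka(gra):
--     naj = []
--     for elem in gra:
--         if elem[1][-1] is not '6':
--             continue
--         if len(naj) == 0:
--             naj.append(elem)
--             continue
--         elif len(naj[0][1]) == len(elem[1]):
--             naj.append(elem)
--         elif len(naj[0][1]) < len(elem[1]):
--             naj = [elem]
--
--     wynik = ["", 0]
--
--     for fin in naj:
--         if wynik[1] < suma(fin[1]):
--             wynik = [fin[0], suma(fin[1])]
--     return wynik[0]
--
-- def suma(s):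
--     wynik = 0
--     for c in s:
--         wynik += int(c)
--     return wynik
-- ===== SOURCE B (Python) =====
-- def suma(s):
--     wynik = 0
--     for c in s:
--         wynik += int(c)
--     return wynik
--
--
-- def kostka(gra):
--     qual = [e for e in gra if e[1][-1] == '6']
--     if not qual:
--         return ""
--     m = max(len(e[1]) for e in qual)
--     return max((e for e in qual if len(e[1]) == m), key=lambda e: suma(e[1]))[0]
-- ===== Notes on version B (the rewrite author's own statement) =====
-- stated objective: simpler
-- what changed: A's incremental scheme (maintain the list of max-length '6'-ending ties while scanning, then rescan it for the max digit sum) is replaced by a staged decomposition: filter the '6'-ending entries, compute the maximum length, then take the first argmax by digit sum among the max-length ones via Python's max with a key.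
import Mathlib
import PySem

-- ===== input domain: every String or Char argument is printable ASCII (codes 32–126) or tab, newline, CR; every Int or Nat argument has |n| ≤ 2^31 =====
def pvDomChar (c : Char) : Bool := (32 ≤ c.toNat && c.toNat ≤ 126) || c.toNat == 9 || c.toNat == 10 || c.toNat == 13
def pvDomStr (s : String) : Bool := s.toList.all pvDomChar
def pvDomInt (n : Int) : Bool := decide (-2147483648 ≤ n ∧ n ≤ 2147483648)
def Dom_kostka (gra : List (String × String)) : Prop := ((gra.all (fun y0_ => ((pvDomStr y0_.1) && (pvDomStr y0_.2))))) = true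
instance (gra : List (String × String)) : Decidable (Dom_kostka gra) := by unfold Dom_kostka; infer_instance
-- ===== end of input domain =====

-- B replaces A's incremental collect-max-length-ties-then-rescan scheme by a staged
-- filter / max-length / argmax-by-digit-sum decomposition: simpler, same cost.

-- ===== PORT A =====
-- int(c) for a single character c (ValueError = none; never hit inside Pre_)
def pvCharInt (c : Char) : Int := (PySem.Int.ofStr? (String.singleton c)).getD 0

-- helper suma(s): sum of int(c) over the characters of s (both Source A and Source B define it)
def suma (s : String) : Int := s.toList.foldl (fun w c => w + pvCharInt c) 0

-- body of A's first loop (one elem step on the naj accumulator)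
def kostkaStep (naj : List (String × String)) (e : String × String) : List (String × String) :=
  if PySem.Str.pyGet? e.2 (-1) ≠ some '6' then naj
  else match naj with
    | [] => [e]
    | h :: _ =>
      if PySem.Str.len h.2 = PySem.Str.len e.2 then naj ++ [e]
      else if PySem.Str.len h.2 < PySem.Str.len e.2 then [e]
      else naj

-- body of A's second loop (wynik update)
def kostkaFin (w : String × Int) (fin : String × String) : String × Int :=
  if w.2 < suma fin.2 then (fin.1, suma fin.2) else w

def kostka (gra : List (String × String)) : String :=
  let naj := gra.foldl kostkaStep []
  let wynik := naj.foldl kostkaFin (("", 0) : String × Int)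
  wynik.1

-- ===== PORT B =====
-- Source B: qual = [e for e in gra if e[1][-1] == '6']
def qualB (gra : List (String × String)) : List (String × String) :=
  gra.filter (fun e => PySem.Str.pyGet? e.2 (-1) == some '6')

-- Source B: if not qual: return ""; m = max(len(e[1]) for e in qual);
-- return max((e for e in qual if len(e[1]) == m), key=lambda e: suma(e[1]))[0].
-- Python's builtin max is PySem.List.max? (first extremal element); the inner
-- 'none' branches are unreachable (max over a nonempty list).
def kostka_alt (gra : List (String × String)) : String :=
  if (qualB gra).isEmpty then ""
  else
    match PySem.List.max? ((qualB gra).map fun e => PySem.Str.len e.2) (fun x => x) with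
    | none => ""
    | some m =>
      match PySem.List.max? ((qualB gra).filter fun e => PySem.Str.len e.2 == m)
          (fun e => suma e.2) with
      | none => ""
      | some b => b.1

-- ===== PRECONDITION & SPEC =====
-- Pre_ excludes exactly the inputs on which the Python A raises: an empty second string
-- (IndexError at elem[1][-1]) or a non-digit character in a '6'-ending string of maximal
-- length among the '6'-ending ones (ValueError in suma, which A applies to exactly those
-- strings). B raises the same exceptions on the same inputs; wherever A returns, Pre_ holds.
def Pre_kostka (gra : List (String × String)) : Prop :=
  (gra.all fun p => !p.2.toList.isEmpty &&
     (PySem.Str.pyGet? p.2 (-1) != some '6' ||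
      !(gra.all fun q => PySem.Str.pyGet? q.2 (-1) != some '6' ||
          decide (PySem.Str.len q.2 ≤ PySem.Str.len p.2)) ||
      p.2.toList.all Char.isDigit)) = true
instance (gra : List (String × String)) : Decidable (Pre_kostka gra) := by
  unfold Pre_kostka; infer_instance

def pvWitness_kostka : (List (String × String)) := [("a", "16"), ("b", "71"), ("c", "906")]

def Spec_kostka (gra : List (String × String)) (out : String) : Prop := out = kostka_alt gra
instance (gra : List (String × String)) (out : String) : Decidable (Spec_kostka gra out) := by
  unfold Spec_kostka; infer_instance

-- ===== CLAIM (what is proved, stated in full; the proofs are below) =====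
def Claim_equal_kostka : Prop :=
  ∀ (gra : List (String × String)), Dom_kostka gra → Pre_kostka gra →
    Spec_kostka gra (kostka gra)

-- ===== LEMMAS AND PROOFS =====

-- Pre_ in the pointwise form the main proof uses: a max-length qualifier is all digits
lemma pre_digits (gra : List (String × String)) (hpre : Pre_kostka gra) :
    ∀ p ∈ gra, PySem.Str.pyGet? p.2 (-1) = some '6' →
      (∀ q ∈ gra, PySem.Str.pyGet? q.2 (-1) = some '6' →
          PySem.Str.len q.2 ≤ PySem.Str.len p.2) →
      ∀ c ∈ p.2.toList, c.isDigit := by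
  intro p hp h6 hmax
  have h := List.all_eq_true.mp hpre p hp
  simp only [Bool.and_eq_true, Bool.or_eq_true, bne_iff_ne, ne_eq, Bool.not_eq_true',
    List.all_eq_true] at h
  rcases h.2 with (h1 | h1) | h1
  · exact absurd h6 h1
  · exfalso
    rw [List.all_eq_false] at h1
    obtain ⟨q, hq, hf⟩ := h1
    simp only [Bool.or_eq_true, bne_iff_ne, ne_eq, decide_eq_true_eq, not_or, not_not] at hf
    exact hf.2 (hmax q hq hf.1)
  · exact h1

-- running maximum of the string lengths over h :: t
def maxOf (h : String × String) (t : List (String × String)) : Int :=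
  t.foldl (fun a e => max a (PySem.Str.len e.2)) (PySem.Str.len h.2)

-- the value A's first loop computes: the max-length qualifiers, in order
def canon (gra : List (String × String)) : List (String × String) :=
  match qualB gra with
  | [] => []
  | h :: t => (h :: t).filter (fun e => PySem.Str.len e.2 == maxOf h t)

lemma canon_eq_nil (gra : List (String × String)) (hq : qualB gra = []) :
    canon gra = [] := by unfold canon; rw [hq]

lemma canon_eq_cons (gra : List (String × String)) (h : String × String)
    (t : List (String × String)) (hq : qualB gra = h :: t) :
    canon gra = (h :: t).filter (fun e => PySem.Str.len e.2 == maxOf h t) := by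
  unfold canon; rw [hq]

-- first argmax of suma over b :: l, as a plain fold
def sfold (b : String × String) (l : List (String × String)) : String × String :=
  l.foldl (fun b e => if suma b.2 < suma e.2 then e else b) b

-- Python's max with key suma, unfolded on a nonempty list: it IS the first-argmax fold
lemma max?_cons_suma (x : String × String) (t : List (String × String)) :
    PySem.List.max? (x :: t) (fun e => suma e.2) = some (sfold x t) := by
  simp only [PySem.List.max?, List.foldl_cons, sfold]
  induction t generalizing x with
  | nil => rfl
  | cons y r ih =>
    simp only [List.foldl_cons]
    by_cases h : suma x.2 < suma y.2
    · simp only [if_pos h]; exact ih y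
    · simp only [if_neg h]; exact ih x

-- qualifiers accumulate one element at a time
lemma qualB_append (l : List (String × String)) (e : String × String) :
    qualB (l ++ [e]) =
      qualB l ++ (if PySem.Str.pyGet? e.2 (-1) = some '6' then [e] else []) := by
  unfold qualB
  rw [List.filter_append]
  congr 1
  simp only [List.filter_cons, List.filter_nil]
  by_cases h : PySem.Str.pyGet? e.2 (-1) = some '6'
  · rw [if_pos h, if_pos (by simp only [beq_iff_eq]; exact h)]
  · rw [if_neg h, if_neg (by simp only [beq_iff_eq]; exact h)]

lemma maxOf_append (h : String × String) (t : List (String × String))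
    (e : String × String) :
    maxOf h (t ++ [e]) = max (maxOf h t) (PySem.Str.len e.2) := by
  unfold maxOf; rw [List.foldl_append]; rfl

lemma maxOf_isMax (h : String × String) (t : List (String × String)) :
    ∀ y ∈ h :: t, PySem.Str.len y.2 ≤ maxOf h t := by
  intro y hy
  have hle := PySem.List.le_foldl_max_int t (fun e => PySem.Str.len e.2) (PySem.Str.len h.2)
  rcases List.mem_cons.mp hy with h1 | h1
  · subst h1; exact hle.1
  · exact hle.2 y h1

-- the running max of lengths is attained
lemma maxOf_attained (h : String × String) (t : List (String × String)) :
    ∃ y ∈ h :: t, PySem.Str.len y.2 = maxOf h t := by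
  induction t using List.reverseRecOn with
  | nil => exact ⟨h, by simp, rfl⟩
  | append_singleton t e ih =>
    obtain ⟨y, hy, hv⟩ := ih
    rw [maxOf_append]
    by_cases hc : maxOf h t ≤ PySem.Str.len e.2
    · exact ⟨e, by simp, by omega⟩
    · exact ⟨y, by rcases List.mem_cons.mp hy with h1 | h1 <;> simp [h1], by omega⟩

-- canon is nonempty when there is a qualifier
lemma canon_ne_nil (gra : List (String × String)) (h : String × String)
    (t : List (String × String)) (hq : qualB gra = h :: t) : canon gra ≠ [] := by
  rw [canon_eq_cons gra h t hq]
  obtain ⟨y, hy, hv⟩ := maxOf_attained h t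
  intro hnil
  have hmem : y ∈ (h :: t).filter (fun e => PySem.Str.len e.2 == maxOf h t) :=
    List.mem_filter.mpr ⟨hy, by simp only [beq_iff_eq]; exact hv⟩
  rw [hnil] at hmem
  exact List.not_mem_nil hmem

-- every member of canon is a qualifier of maximal length
lemma mem_canon_len (gra : List (String × String)) (h : String × String)
    (t : List (String × String)) (hq : qualB gra = h :: t)
    (c : String × String) (hc : c ∈ canon gra) :
    c ∈ h :: t ∧ PySem.Str.len c.2 = maxOf h t := by
  rw [canon_eq_cons gra h t hq] at hc
  have hm := List.mem_filter.mp hc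
  exact ⟨hm.1, by have := hm.2; simp only [beq_iff_eq] at this; exact this⟩

lemma kostkaStep_skip (naj : List (String × String)) (e : String × String)
    (h : PySem.Str.pyGet? e.2 (-1) ≠ some '6') : kostkaStep naj e = naj := by
  unfold kostkaStep; rw [if_pos h]

lemma kostkaStep_nil (e : String × String)
    (h : PySem.Str.pyGet? e.2 (-1) = some '6') : kostkaStep [] e = [e] := by
  unfold kostkaStep; rw [if_neg (fun hn => hn h)]

lemma kostkaStep_cons (h' : String × String) (t : List (String × String))
    (e : String × String) (h : PySem.Str.pyGet? e.2 (-1) = some '6') :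
    kostkaStep (h' :: t) e =
      if PySem.Str.len h'.2 = PySem.Str.len e.2 then (h' :: t) ++ [e]
      else if PySem.Str.len h'.2 < PySem.Str.len e.2 then [e] else h' :: t := by
  unfold kostkaStep; rw [if_neg (fun hn => hn h)]

-- ===== A's first loop computes canon =====
lemma loop1_canon (gra : List (String × String)) :
    gra.foldl kostkaStep [] = canon gra := by
  induction gra using List.reverseRecOn with
  | nil => rw [List.foldl_nil, canon_eq_nil [] rfl]
  | append_singleton l e ih =>
    rw [List.foldl_append, List.foldl_cons, List.foldl_nil, ih]
    by_cases he : PySem.Str.pyGet? e.2 (-1) = some '6'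
    · -- e qualifies
      rcases hq : qualB l with _ | ⟨h, t⟩
      · -- no previous qualifier
        rw [canon_eq_nil l hq, kostkaStep_nil e he,
          canon_eq_cons (l ++ [e]) e [] (by rw [qualB_append, hq, if_pos he]; rfl)]
        simp [maxOf]
      · -- previous qualifiers h :: t
        obtain ⟨c, cs, hcc⟩ := List.exists_cons_of_ne_nil (canon_ne_nil l h t hq)
        have hclen : PySem.Str.len c.2 = maxOf h t :=
          (mem_canon_len l h t hq c (by rw [hcc]; simp)).2
        have hq' : qualB (l ++ [e]) = h :: (t ++ [e]) := by
          rw [qualB_append, hq, if_pos he]; rfl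
        have hcanon' : canon (l ++ [e]) =
            (h :: (t ++ [e])).filter
              (fun x => PySem.Str.len x.2 == max (maxOf h t) (PySem.Str.len e.2)) := by
          rw [canon_eq_cons (l ++ [e]) h (t ++ [e]) hq', maxOf_append]
        rw [hcc, kostkaStep_cons c cs e he]
        rcases lt_trichotomy (PySem.Str.len c.2) (PySem.Str.len e.2) with hlt | heq | hgt
        · -- strictly longer: reset to [e]
          rw [if_neg (by omega), if_pos hlt, hcanon']
          have hmax : max (maxOf h t) (PySem.Str.len e.2) = PySem.Str.len e.2 := by omega
          rw [hmax, show (h :: (t ++ [e])) = (h :: t) ++ [e] by rfl, List.filter_append]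
          have h1 : (h :: t).filter (fun x => PySem.Str.len x.2 == PySem.Str.len e.2) = [] := by
            rw [List.filter_eq_nil_iff]
            intro y hy
            have := maxOf_isMax h t y hy
            simp only [beq_iff_eq]
            omega
          rw [h1, List.nil_append]
          simp only [List.filter_cons, List.filter_nil]
          rw [if_pos (by simp only [beq_iff_eq])]
        · -- equal length: append e
          rw [if_pos heq, ← hcc, hcanon']
          have hmax : max (maxOf h t) (PySem.Str.len e.2) = maxOf h t := by omega
          rw [hmax, show (h :: (t ++ [e])) = (h :: t) ++ [e] by rfl, List.filter_append]
          have h2 : [e].filter (fun x => PySem.Str.len x.2 == maxOf h t) = [e] := by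
            simp only [List.filter_cons, List.filter_nil]
            rw [if_pos (by simp only [beq_iff_eq]; omega)]
          rw [h2, canon_eq_cons l h t hq]
        · -- strictly shorter: keep
          rw [if_neg (by omega), if_neg (by omega), ← hcc, hcanon']
          have hmax : max (maxOf h t) (PySem.Str.len e.2) = maxOf h t := by omega
          rw [hmax, show (h :: (t ++ [e])) = (h :: t) ++ [e] by rfl, List.filter_append]
          have h2 : [e].filter (fun x => PySem.Str.len x.2 == maxOf h t) = [] := by
            simp only [List.filter_cons, List.filter_nil]
            rw [if_neg (by simp only [beq_iff_eq]; omega)]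
          rw [h2, List.append_nil, canon_eq_cons l h t hq]
    · -- e does not qualify: both sides unchanged
      rw [kostkaStep_skip _ _ he]
      rcases hq : qualB l with _ | ⟨h, t⟩
      · rw [canon_eq_nil l hq,
          canon_eq_nil (l ++ [e]) (by rw [qualB_append, hq, if_neg he]; exact List.append_nil _)]
      · rw [canon_eq_cons l h t hq,
          canon_eq_cons (l ++ [e]) h t (by rw [qualB_append, hq, if_neg he]; exact List.append_nil _)]

-- ===== digit sums are positive on the admitted strings =====
lemma digit_nonneg (c : Char) (h : c.isDigit) : 0 ≤ pvCharInt c := by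
  have h1 : 48 ≤ c.toNat ∧ c.toNat ≤ 57 := by
    rw [Char.isDigit] at h
    simp only [ge_iff_le, Bool.and_eq_true, decide_eq_true_eq, UInt32.le_iff_toNat_le] at h
    exact h
  obtain ⟨ha, hb⟩ := h1
  have hc : c = Char.ofNat c.toNat := (Char.ofNat_toNat c).symm
  interval_cases h2 : c.toNat <;> rw [hc] <;> decide

lemma foldl_add_ge (l : List Char) (a : Int) (h : ∀ c ∈ l, c.isDigit) :
    a ≤ l.foldl (fun w c => w + pvCharInt c) a := by
  induction l generalizing a with
  | nil => simp
  | cons c t ih =>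
    simp only [List.foldl_cons]
    have h1 : 0 ≤ pvCharInt c := digit_nonneg c (h c (by simp))
    calc a ≤ a + pvCharInt c := by omega
      _ ≤ _ := ih _ (fun x hx => h x (by simp [hx]))

-- a nonempty all-digit string ending in '6' has positive digit sum
lemma suma_pos (s : String)
    (hd : ∀ c ∈ s.toList, c.isDigit)
    (hq : PySem.Str.pyGet? s (-1) = some '6') : 0 < suma s := by
  have hlast : s.toList.getLast? = some '6' := by
    rw [← hq]; simp [PySem.Str.pyGet?, PySem.List.pyGet?_neg_one]
  obtain ⟨l', hl⟩ := List.getLast?_eq_some_iff.mp hlast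
  have h6 : pvCharInt '6' = 6 := by decide
  have hd' : ∀ c ∈ l', c.isDigit := fun c hc => hd c (by simp [hl, hc])
  have := foldl_add_ge l' 0 hd'
  have h2 : suma s = l'.foldl (fun w c => w + pvCharInt c) 0 + 6 := by
    simp [suma, hl, List.foldl_append, h6]
  omega

-- A's second loop, started after the first (positive-sum) element, is the sfold argmax
lemma phase2_sfold (l : List (String × String)) (b : String × String) :
    l.foldl kostkaFin (b.1, suma b.2) = ((sfold b l).1, suma (sfold b l).2) := by
  induction l generalizing b with
  | nil => simp [sfold]
  | cons x t ih =>
    simp only [List.foldl_cons, sfold, kostkaFin]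
    by_cases h : suma b.2 < suma x.2
    · simp only [h]; exact ih x
    · simp only [h]; exact ih b

-- ===== VERDICT (by name: the statement is the Claim_ definition above) =====
theorem kostka_spec : Claim_equal_kostka := by
  intro gra _ hpre
  show ((gra.foldl kostkaStep []).foldl kostkaFin (("", 0) : String × Int)).1 = kostka_alt gra
  rw [loop1_canon]
  rcases hq : qualB gra with _ | ⟨h, t⟩
  · -- no qualifier: both return ""
    rw [canon_eq_nil gra hq]
    unfold kostka_alt
    rw [hq]
    rfl
  · -- qualifiers exist
    obtain ⟨c, cs, hcc⟩ := List.exists_cons_of_ne_nil (canon_ne_nil gra h t hq)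
    have hcmem := mem_canon_len gra h t hq c (by rw [hcc]; simp)
    -- c is a max-length qualifier of gra, so Pre_ makes it all digits
    have hcq : c ∈ gra ∧ PySem.Str.pyGet? c.2 (-1) = some '6' := by
      have hcin : c ∈ qualB gra := by rw [hq]; exact hcmem.1
      have := List.mem_filter.mp hcin
      exact ⟨this.1, by have h2 := this.2; simp only [beq_iff_eq] at h2; exact h2⟩
    have hcmax : ∀ q ∈ gra, PySem.Str.pyGet? q.2 (-1) = some '6' →
        PySem.Str.len q.2 ≤ PySem.Str.len c.2 := by
      intro q hqin hq6
      have hql : q ∈ qualB gra :=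
        List.mem_filter.mpr ⟨hqin, by simp only [beq_iff_eq]; exact hq6⟩
      rw [hq] at hql
      rw [hcmem.2]
      exact maxOf_isMax h t q hql
    have hdig : ∀ ch ∈ c.2.toList, ch.isDigit := pre_digits gra hpre c hcq.1 hcq.2 hcmax
    have hpos : 0 < suma c.2 := suma_pos c.2 hdig hcq.2
    -- evaluate A's second loop
    rw [hcc, List.foldl_cons]
    have hfirst : kostkaFin ("", 0) c = (c.1, suma c.2) := by
      unfold kostkaFin; rw [if_pos (by exact hpos)]
    rw [hfirst, phase2_sfold]
    -- evaluate B
    unfold kostka_alt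
    rw [hq]
    rw [show (h :: t).isEmpty = false from rfl]
    rw [if_neg (by simp)]
    rw [List.map_cons, PySem.List.max?_id_cons]
    have hm : (t.map fun e => PySem.Str.len e.2).foldl max (PySem.Str.len h.2) = maxOf h t := by
      unfold maxOf; rw [List.foldl_map]
    rw [hm]
    have hfilter : (h :: t).filter (fun e => PySem.Str.len e.2 == maxOf h t) = c :: cs := by
      rw [← hcc, canon_eq_cons gra h t hq]
    simp only [hfilter, max?_cons_suma]
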